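-- pv_equiv track=rewrite | github.com/vaishnn/PacMan | components/library/utils.py | rank_query
-- ===== SOURCE A (Python) =====
-- def rank_query(dataList, query):
--     """
--     Ranks a list of data items based on a query string.
--
--     The function filters `dataList` to find items whose 'name' field (case-insensitive) contains the `query` string (case-insensitive).
--     The matching items are then sorted by the position of the first occurrence of the `query` within their 'name' field.
--     Items where the query appears earlier in the name will be ranked higher.
--
--     Args:
--         dataList (list): A list of dictionaries, where each dictionary is expected to have a 'name' key (str).
--         query (str): The search string to use for filtering and ranking.
--
--     Returns:
--         list: A new list containing the matching items from `dataList`, sorted by the relevance of the query's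
--               position within their 'name'. If no matches are found, an empty list is returned.
--     """
--     lowerQuery = query.lower()
--     matches = [
--         item for item in dataList
--         if lowerQuery in item['name'].lower()
--     ]
--     sortedMatches = sorted(
--         matches,
--         key=lambda item: item['name'].lower().find(lowerQuery)
--     )
--     return sortedMatches
-- ===== SOURCE B (Python) =====
-- def rank_query(dataList, query):
--     # Counting/bucket sort by match position: one pass drops each matching item
--     # into a bucket keyed by the position of the first occurrence of the query in
--     # its lowercased name (tracking the largest position), then the buckets are
--     # emitted in increasing position order. Stable, and no comparison sort at all.
--     lowerQuery = query.lower()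
--     buckets = {}
--     limit = 0
--     for item in dataList:
--         pos = item['name'].lower().find(lowerQuery)
--         if pos >= 0:
--             buckets.setdefault(pos, []).append(item)
--             if pos + 1 > limit:
--                 limit = pos + 1
--     result = []
--     for p in range(limit):
--         result.extend(buckets.get(p, []))
--     return result
-- ===== Notes on version B (the rewrite author's own statement) =====
-- stated objective: alternative
-- what changed: Replaces A's filter-then-comparison-sort (sorted with a find() key) by a counting/bucket sort: one pass drops each matching item into a dict bucket keyed by its match position while tracking the largest position, then buckets are emitted in increasing position order with no comparison sort.
import Mathlib
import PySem

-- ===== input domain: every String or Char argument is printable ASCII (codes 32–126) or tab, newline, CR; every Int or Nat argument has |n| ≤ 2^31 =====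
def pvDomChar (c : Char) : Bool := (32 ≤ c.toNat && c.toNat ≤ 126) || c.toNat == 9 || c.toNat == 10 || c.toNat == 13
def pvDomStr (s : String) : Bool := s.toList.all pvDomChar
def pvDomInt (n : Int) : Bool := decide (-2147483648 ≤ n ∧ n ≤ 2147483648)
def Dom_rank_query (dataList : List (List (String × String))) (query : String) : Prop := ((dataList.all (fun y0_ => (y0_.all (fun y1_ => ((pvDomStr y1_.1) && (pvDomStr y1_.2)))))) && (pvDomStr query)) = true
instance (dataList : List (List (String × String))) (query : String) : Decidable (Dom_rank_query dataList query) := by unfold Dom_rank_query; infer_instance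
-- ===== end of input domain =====

-- B replaces A's filter-then-comparison-sort with a counting/bucket sort: one pass drops each
-- matching item into a per-position bucket (dict) while tracking the largest position, then the
-- buckets are emitted in increasing position order (objective: alternative, no comparison sort).


-- shared trivial helper: Python's item['name'] (first-match dict lookup; total here with
-- default "", never reached under Pre_, which requires every item to carry a 'name' key)
def pvName (item : List (String × String)) : String :=
  ((PySem.Dict.mk item).get? "name").getD ""

-- ===== PORT A =====
def rank_query (dataList : List (List (String × String))) (query : String) : List (List (String × String)) :=
  let lowerQuery := PySem.Str.lower query
  let matchedItems := dataList.filter (fun item => PySem.Str.isIn lowerQuery (PySem.Str.lower (pvName item)))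
  PySem.List.sorted matchedItems (fun item => PySem.Str.find (PySem.Str.lower (pvName item)) lowerQuery) false

-- ===== PORT B =====
-- one pass: buckets[pos] grows by item (setdefault+append = modify with default []),
-- limit tracks the largest pos + 1; then the buckets are emitted for p in range(limit)
def rank_query_alt (dataList : List (List (String × String))) (query : String) : List (List (String × String)) :=
  let lowerQuery := PySem.Str.lower query
  let st := dataList.foldl
    (fun (st : PySem.Dict Int (List (List (String × String))) × Int) item =>
      let pos := PySem.Str.find (PySem.Str.lower (pvName item)) lowerQuery
      if 0 ≤ pos then
        (st.1.modify pos [] (fun b => b ++ [item]),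
         if pos + 1 > st.2 then pos + 1 else st.2)
      else st)
    (PySem.Dict.empty, (0 : Int))
  (PySem.List.pyRange 0 st.2 1).foldl (fun res p => res ++ st.1.getD p []) []

-- ===== PRECONDITION & SPEC =====
-- Pre_ excludes exactly the inputs where Python A raises KeyError: an item without a 'name' key.
def Pre_rank_query (dataList : List (List (String × String))) (query : String) : Prop :=
  dataList.all (fun item => (PySem.Dict.mk item).contains "name") = true
instance (dataList : List (List (String × String))) (query : String) : Decidable (Pre_rank_query dataList query) := by unfold Pre_rank_query; infer_instance
def pvWitness_rank_query : (List (List (String × String))) × String :=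
  ([[("name", "pip")], [("name", "numpy")]], "p")
def Spec_rank_query (dataList : List (List (String × String))) (query : String) (out : List (List (String × String))) : Prop := out = rank_query_alt dataList query
instance (dataList : List (List (String × String))) (query : String) (out : List (List (String × String))) : Decidable (Spec_rank_query dataList query out) := by unfold Spec_rank_query; infer_instance

-- ===== CLAIM (what is proved, stated in full; the proofs are below) =====
def Claim_equal_rank_query : Prop := ∀ (dataList : List (List (String × String))) (query : String), Dom_rank_query dataList query → Pre_rank_query dataList query → Spec_rank_query dataList query (rank_query dataList query)

-- ===== LEMMAS AND PROOFS =====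

-- insertion before a tail B that the element always precedes stays inside A ++ [x] ++ B
theorem pv_insertBy_append_right {α : Type} (before : α → α → Bool) (x : α) (A B : List α)
    (h : ∀ y ∈ B, before x y = true) :
    PySem.List.insertBy before x (A ++ B) = PySem.List.insertBy before x A ++ B := by
  induction A with
  | nil =>
    cases B with
    | nil => simp [PySem.List.insertBy]
    | cons b B' => simp [PySem.List.insertBy, h b (by simp)]
  | cons a A' ih =>
    simp only [List.cons_append, PySem.List.insertBy]
    split_ifs <;> simp [ih]

-- stability of sorted at the top key m: items with key = m come last, in input order
theorem pv_sorted_split_last {α : Type} (key : α → Int) (m : Int) (xs : List α)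
    (h : ∀ x ∈ xs, key x ≤ m) :
    PySem.List.sorted xs key false =
      PySem.List.sorted (xs.filter (fun x => decide (key x < m))) key false
        ++ xs.filter (fun x => key x == m) := by
  induction xs using List.reverseRecOn with
  | nil => simp [PySem.List.sorted_eq_foldl_insertBy]
  | append_singleton xs x ih =>
    have hxs : ∀ y ∈ xs, key y ≤ m := fun y hy => h y (List.mem_append_left _ hy)
    have hx : key x ≤ m := h x (by simp)
    have e1 : ∀ ys : List α, PySem.List.sorted (ys ++ [x]) key false =
        PySem.List.insertBy (fun a b => decide (key a < key b)) x (PySem.List.sorted ys key false) := by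
      intro ys
      rw [PySem.List.sorted_eq_foldl_insertBy (ys ++ [x]), List.foldl_append,
        ← PySem.List.sorted_eq_foldl_insertBy ys]
      simp
    rw [e1, ih hxs, List.filter_append, List.filter_append]
    by_cases hklt : key x < m
    · have hne : (key x == m) = false := by simp; omega
      rw [show List.filter (fun x => key x == m) [x] = [] by simp [hne],
          show List.filter (fun x => decide (key x < m)) [x] = [x] by simp [hklt],
          List.append_nil, e1]
      rw [pv_insertBy_append_right]
      intro y hy
      have : key y = m := by
        have := (List.mem_filter.mp hy).2
        simpa using this
      simp; omega
    · have hkeq : key x = m := by omega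
      rw [show List.filter (fun x => key x == m) [x] = [x] by simp [hkeq],
          show List.filter (fun x => decide (key x < m)) [x] = [] by simp; omega,
          List.append_nil]
      rw [PySem.List.insertBy_of_forall_not_before]
      · rw [List.append_assoc]
      · intro y hy
        rcases List.mem_append.mp hy with hy | hy
        · have : key y < m := by
            have := (List.mem_filter.mp ((PySem.List.mem_sorted _ _ _ _).mp hy)).2
            simpa using this
          simp; omega
        · have : key y = m := by
            have := (List.mem_filter.mp hy).2
            simpa using this
          simp; omega

-- a counting sort: emitting the key-p bucket for p = 0, 1, …, n-1 IS the stable sort by key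
theorem pv_bucket_sorted {α : Type} (key : α → Int) :
    ∀ (n : Nat) (xs : List α), (∀ x ∈ xs, 0 ≤ key x) → (∀ x ∈ xs, key x < (n : Int)) →
    (List.range n).flatMap (fun (p : Nat) => xs.filter (fun x => key x == (p : Int)))
      = PySem.List.sorted xs key false := by
  intro n
  induction n with
  | zero =>
    intro xs h0 h1
    cases xs with
    | nil => simp [PySem.List.sorted_eq_foldl_insertBy]
    | cons a t =>
      have := h0 a (by simp)
      have := h1 a (by simp)
      simp at *; omega
  | succ n ih =>
    intro xs h0 h1
    rw [List.range_succ, List.flatMap_append]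
    have hm : ∀ x ∈ xs, key x ≤ (n : Int) := by
      intro x hx; have := h1 x hx; push_cast at this ⊢; omega
    have hbuck : ∀ p ∈ List.range n,
        xs.filter (fun x => key x == (p : Int))
          = (xs.filter (fun x => decide (key x < (n : Int)))).filter (fun x => key x == (p : Int)) := by
      intro p hp
      rw [List.filter_filter]
      apply (List.filter_congr ?_)
      intro x hx
      by_cases hkp : key x = (p : Int)
      · have hpn : (p : Int) < (n : Int) := by exact_mod_cast List.mem_range.mp hp
        simp [hkp, hpn]
      · simp [hkp]
    rw [List.flatMap_congr hbuck, ih]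
    · rw [show (List.flatMap (fun (p : Nat) => xs.filter (fun x => key x == (p : Int))) [n])
          = xs.filter (fun x => key x == (n : Int)) by simp]
      exact (pv_sorted_split_last key (n : Int) xs hm).symm
    · intro x hx; exact h0 x (List.mem_filter.mp hx).1
    · intro x hx
      have := (List.mem_filter.mp hx).2
      simpa using this

-- ===== VERDICT (by name: the statement is the Claim_ definition above) =====
theorem rank_query_spec : Claim_equal_rank_query := by
  intro dataList query _ _
  unfold Spec_rank_query rank_query rank_query_alt
  dsimp only
  set q := PySem.Str.lower query with hq
  set key : List (String × String) → Int :=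
    fun item => PySem.Str.find (PySem.Str.lower (pvName item)) q with hkey
  -- B's single loop with a pair state is the pair of its two component loops
  rw [PySem.List.foldl_congr_mem dataList _
        (fun (st : PySem.Dict Int (List (List (String × String))) × Int) item =>
          ((fun d it => if 0 ≤ key it then d.modify (key it) [] (fun b => b ++ [it]) else d) st.1 item,
           (fun m it => if 0 ≤ key it then (if key it + 1 > m then key it + 1 else m) else m) st.2 item))
        _ (by intro acc x _; dsimp only; split_ifs <;> rfl)]
  beta_reduce
  rw [PySem.List.foldl_prod_mk
        (f := fun (d : PySem.Dict Int (List (List (String × String)))) it =>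
          if 0 ≤ key it then d.modify (key it) [] (fun b => b ++ [it]) else d)
        (g := fun m it => if 0 ≤ key it then (if key it + 1 > m then key it + 1 else m) else m)]
  set mts := dataList.filter (fun item => decide (0 ≤ key item)) with hmts
  -- the bucket dict: getD p [] is exactly the key-p bucket, in input order
  have hD : ∀ c : Int,
      (dataList.foldl (fun d it => if 0 ≤ key it then d.modify (key it) [] (fun b => b ++ [it]) else d)
        PySem.Dict.empty).getD c []
        = mts.filter (fun it => key it == c) := by
    intro c
    rw [PySem.List.foldl_ite_eq_foldl_filter (p := fun it => 0 ≤ key it), ← hmts,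
        show (mts.foldl (fun d it => d.modify (key it) [] (fun b => b ++ [it])) PySem.Dict.empty)
          = ((mts.map (fun it => (key it, it))).foldl
              (fun d pr => d.modify pr.1 [] (fun b => b ++ [pr.2])) PySem.Dict.empty) by
          rw [List.foldl_map],
        PySem.Dict.getD_foldl_modify_append, List.filter_map, PySem.Dict.getD_empty]
    simp [Function.comp_def]
  -- the limit accumulator is the running max of pos + 1 over the mts
  have hMfold :
      (dataList.foldl (fun m it => if 0 ≤ key it then (if key it + 1 > m then key it + 1 else m) else m) 0)
        = mts.foldl (fun m it => max m (key it + 1)) 0 := by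
    rw [PySem.List.foldl_ite_eq_foldl_filter (p := fun it => 0 ≤ key it), ← hmts]
    apply PySem.List.foldl_congr_mem
    intro acc x _
    split_ifs with hgt
    · exact (max_eq_right (by omega)).symm
    · exact (max_eq_left (by omega)).symm
  rw [hMfold]
  set M := mts.foldl (fun m it => max m (key it + 1)) 0 with hM
  obtain ⟨hM0, hMbound⟩ := PySem.List.le_foldl_max_int mts (fun it => key it + 1) 0
  rw [← hM] at hM0 hMbound
  have hMn : M = ((M.toNat : Nat) : Int) := (Int.toNat_of_nonneg hM0).symm
  -- emit the buckets and recognise the counting sort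
  rw [PySem.List.foldl_append_eq_flatMap, List.nil_append, hMn,
      PySem.List.pyRange_zero_natCast, List.flatMap_map]
  have hflat : (List.range M.toNat).flatMap
        (fun (p : Nat) => (dataList.foldl
            (fun d it => if 0 ≤ key it then d.modify (key it) [] (fun b => b ++ [it]) else d)
            PySem.Dict.empty).getD (p : Int) [])
      = (List.range M.toNat).flatMap (fun (p : Nat) => mts.filter (fun it => key it == (p : Int))) :=
    List.flatMap_congr (fun p _ => hD (p : Int))
  rw [hflat, pv_bucket_sorted key M.toNat mts
        (fun x hx => by simpa using (List.mem_filter.mp hx).2)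
        (fun x hx => by
          have := hMbound x hx
          omega)]
  -- A's match filter is B's pos ≥ 0 filter
  have hfilter : dataList.filter (fun item => PySem.Str.isIn q (PySem.Str.lower (pvName item)))
      = mts := by
    rw [hmts]
    apply List.filter_congr
    intro item _
    rw [Bool.eq_iff_iff, decide_eq_true_iff, hkey]
    rw [PySem.Str.isIn_iff_infix, PySem.Str.find_nonneg_iff]
  rw [hfilter]
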